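-- pv_equiv track=rewrite | github.com/pypi-data/pypi-mirror-221 | packages/pistar/pistar-2.5.0-py3-none-any.whl/_pistar/utilities/condition/condition.py | parent_nodeids_iter
-- ===== SOURCE A (Python) =====
-- from typing import Iterator
--
-- SEP = "/"
--
-- def parent_nodeids_iter(nodeid: str) -> Iterator[str]:
--     """
--     Return the parent node IDs of a given node ID, inclusive.
--
--     For the node ID
--
--         "testing/foo/test_example.py::Bar"
--
--     the result would be
--
--         ""
--         "testing"
--         "testing/foo"
--         "testing/foo/test_example.py"
--         "testing/foo/test_example.py::Bar"
--
--     """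
--     pos = 0
--     sep = SEP
--     yield ""
--     while True:
--         at = nodeid.find(sep, pos)
--         if at == -1 and sep == SEP:
--             sep = "::"
--         elif at == -1:
--             if nodeid:
--                 yield nodeid
--             break
--         else:
--             if at:
--                 yield nodeid[:at]
--             pos = at + len(sep)
-- ===== SOURCE B (Python) =====
-- def parent_nodeids_iter(nodeid):
--     """Yield parent node IDs of nodeid, inclusive (split on "/", then "::" in the last segment)."""
--     yield ""
--     parts = nodeid.split("/")
--     prefix = None
--     for part in parts[:-1]:
--         prefix = part if prefix is None else prefix + "/" + part
--         if prefix: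
--             yield prefix
--     base = nodeid[:len(nodeid) - len(parts[-1])]
--     sub = parts[-1].split("::")
--     acc = base + sub[0]
--     for piece in sub[1:]:
--         if acc:
--             yield acc
--         acc = acc + "::" + piece
--     if nodeid:
--         yield nodeid
-- ===== Notes on version B (the rewrite author's own statement) =====
-- stated objective: alternative
-- what changed: A's single stateful while-loop re-scanning nodeid with find(sep, pos) and a mid-loop separator switch is replaced by splitting nodeid on '/' once, rebuilding the '/'-prefixes cumulatively over parts[:-1], then splitting the last segment on '::' and extending an accumulator per piece.
import Mathlib
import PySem

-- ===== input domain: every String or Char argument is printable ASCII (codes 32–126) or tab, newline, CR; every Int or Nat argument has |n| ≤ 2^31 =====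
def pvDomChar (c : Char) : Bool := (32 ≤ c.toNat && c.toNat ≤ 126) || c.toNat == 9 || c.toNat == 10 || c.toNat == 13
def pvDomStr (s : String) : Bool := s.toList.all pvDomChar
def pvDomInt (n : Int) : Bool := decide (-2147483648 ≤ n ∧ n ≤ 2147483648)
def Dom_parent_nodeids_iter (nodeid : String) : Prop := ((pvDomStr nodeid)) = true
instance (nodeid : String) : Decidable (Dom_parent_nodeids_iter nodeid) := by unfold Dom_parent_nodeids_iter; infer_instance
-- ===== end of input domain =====

-- B replaces A's single find-scan with a split-then-reconstruct decomposition (same cost); equal output proved below.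

-- ===== PORT A =====
-- A's 'while True' loop: pos/sep state, nodeid.find(sep, pos) each round, yield nodeid[:at] on a hit;
-- the fuel argument only makes the recursion structural (s.length + 3 rounds always suffice: each hit
-- advances pos, plus one sep switch and one final round).
def pvLoopA (s sep : List Char) (pos : Int) : Nat → List (List Char)
  | 0 => []
  | fuel + 1 =>
    let a := PySem.Chars.findFrom s sep pos
    if a = -1 ∧ sep = ['/'] then
      pvLoopA s [':', ':'] pos fuel
    else if a = -1 then
      (if s.isEmpty then [] else [s])
    else
      (if a ≠ 0 then [PySem.Chars.slice s none (some a)] else []) ++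
        pvLoopA s sep (a + sep.length) fuel

def parent_nodeids_iter (nodeid : String) : List String :=
  let s := nodeid.toList
  (([] : List Char) :: pvLoopA s ['/'] 0 (s.length + 3)).map String.ofList

-- ===== PORT B =====
-- Source B's first loop: over parts[:-1], cumulative '/'-joined prefix, yield when non-empty.
def pvSlashLoop : List (List Char) → Option (List Char) → List (List Char)
  | [], _ => []
  | part :: rest, pref? =>
    let pref := match pref? with
      | none => part
      | some q => q ++ '/' :: part
    (if pref.isEmpty then [] else [pref]) ++ pvSlashLoop rest (some pref)

-- Source B's second loop: over sub[1:], accumulator acc, yield when non-empty, then acc += "::" + piece.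
def pvColonLoop : List Char → List (List Char) → List (List Char)
  | _, [] => []
  | acc, piece :: rest =>
    (if acc.isEmpty then [] else [acc]) ++ pvColonLoop (acc ++ ':' :: ':' :: piece) rest

def parent_nodeids_iter_alt (nodeid : String) : List String :=
  let s := nodeid.toList
  let parts := PySem.Chars.splitOn s ['/']
  let lastp := parts.getLastD []                 -- parts[-1]; parts is never empty
  let base := PySem.Chars.slice s none (some ((s.length : Int) - (lastp.length : Int)))  -- nodeid[:len(nodeid)-len(parts[-1])]
  let sub := PySem.Chars.splitOn lastp [':', ':']
  (([] : List Char) ::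
    (pvSlashLoop parts.dropLast none ++
     pvColonLoop (base ++ sub.headD []) sub.tail ++
     (if s.isEmpty then [] else [s]))).map String.ofList

-- ===== PRECONDITION & SPEC =====
def Spec_parent_nodeids_iter (nodeid : String) (out : List String) : Prop := out = parent_nodeids_iter_alt nodeid
instance (nodeid : String) (out : List String) : Decidable (Spec_parent_nodeids_iter nodeid out) := by unfold Spec_parent_nodeids_iter; infer_instance

-- ===== CLAIM (what is proved, stated in full; the proofs are below) =====
def Claim_equal_parent_nodeids_iter : Prop := ∀ (nodeid : String), Dom_parent_nodeids_iter nodeid → Spec_parent_nodeids_iter nodeid (parent_nodeids_iter nodeid)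

-- ===== LEMMAS AND PROOFS =====

lemma pv_find_eq_of (s sub : List Char) (k : Nat) (h1 : sub <+: s.drop k)
    (h2 : ∀ i < k, ¬ sub <+: s.drop i) : PySem.Chars.find s sub = (k : Int) := by
  have hinf : sub <:+: s := h1.isInfix.trans (s.drop_suffix k).isInfix
  have hnn : 0 ≤ PySem.Chars.find s sub := (PySem.Chars.find_nonneg_iff s sub).mpr hinf
  obtain ⟨hp, hmin⟩ := PySem.Chars.find_spec hnn
  have heq : (PySem.Chars.find s sub).toNat = k := by
    rcases lt_trichotomy (PySem.Chars.find s sub).toNat k with h | h | h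
    · exact absurd hp (h2 _ h)
    · exact h
    · exact absurd h1 (hmin _ h)
  omega

lemma pv_find_cons (c : Char) (rest sub : List Char) (h : ¬ sub <+: (c :: rest)) :
    PySem.Chars.find (c :: rest) sub =
      if PySem.Chars.find rest sub = -1 then -1 else PySem.Chars.find rest sub + 1 := by
  by_cases hr : PySem.Chars.find rest sub = -1
  · simp only [hr, if_true]
    rw [PySem.Chars.find_eq_neg_one_iff] at hr
    rw [PySem.Chars.find_eq_neg_one_iff]
    intro hinf
    rcases List.infix_cons_iff.mp hinf with hpre | hinf'
    · exact h hpre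
    · exact hr hinf'
  · simp only [hr]
    have hnn : 0 ≤ PySem.Chars.find rest sub := by
      have := PySem.Chars.neg_one_le_find rest sub
      omega
    obtain ⟨hp, hmin⟩ := PySem.Chars.find_spec hnn
    have := pv_find_eq_of (c :: rest) sub ((PySem.Chars.find rest sub).toNat + 1)
      (by simpa using hp)
      (by
        intro i hi
        match i with
        | 0 => simpa using h
        | (i' + 1) =>
          simp only [List.drop_succ_cons]
          exact hmin i' (by omega))
    rw [this]
    push_cast
    omega

lemma pv_find_of_prefix (s sub : List Char) (h : sub <+: s) : PySem.Chars.find s sub = 0 :=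
  pv_find_eq_of s sub 0 (by simpa using h) (by omega)

lemma pv_go_nil (sep cur : List Char) (acc : List (List Char)) (fuel : Nat) :
    PySem.Chars.splitOn.go sep fuel [] cur acc = (cur.reverse :: acc).reverse := by
  cases fuel <;> simp [PySem.Chars.splitOn.go]

lemma pv_go_cons (sep cur : List Char) (acc : List (List Char)) (f : Nat) (c : Char) (rest : List Char) :
    PySem.Chars.splitOn.go sep (f+1) (c :: rest) cur acc =
      if sep.isPrefixOf (c :: rest) then
        PySem.Chars.splitOn.go sep f ((c :: rest).drop sep.length) [] (cur.reverse :: acc)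
      else PySem.Chars.splitOn.go sep f rest (c :: cur) acc := by
  rw [PySem.Chars.splitOn.go]

lemma pv_find_nil_of_ne (sep : List Char) (hsep : sep ≠ []) : PySem.Chars.find [] sep = -1 := by
  rw [PySem.Chars.find_eq_neg_one_iff]
  intro h
  exact hsep (List.eq_nil_of_infix_nil h)

lemma pv_go_spec (sep : List Char) (hsep : sep ≠ []) :
    ∀ n (l : List Char), l.length ≤ n → ∀ (fuel : Nat) (cur : List Char) (acc : List (List Char)),
      l.length ≤ fuel →
      PySem.Chars.splitOn.go sep fuel l cur acc =
        acc.reverse ++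
          (if PySem.Chars.find l sep = -1 then [cur.reverse ++ l]
           else (cur.reverse ++ l.take (PySem.Chars.find l sep).toNat) ::
                PySem.Chars.splitOn (l.drop ((PySem.Chars.find l sep).toNat + sep.length)) sep) := by
  intro n
  induction n with
  | zero =>
    intro l hl fuel cur acc hf
    have : l = [] := List.length_eq_zero_iff.mp (by omega)
    subst this
    rw [pv_go_nil, pv_find_nil_of_ne sep hsep]
    simp
  | succ n ih =>
    intro l hl fuel cur acc hf
    cases l with
    | nil =>
      rw [pv_go_nil, pv_find_nil_of_ne sep hsep]
      simp
    | cons c rest =>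
      have hsl : 1 ≤ sep.length := by
        cases sep
        · exact absurd rfl hsep
        · simp
      obtain ⟨f, rfl⟩ : ∃ f, fuel = f + 1 := ⟨fuel - 1, by simp at hf; omega⟩
      rw [pv_go_cons]
      by_cases hpre : sep.isPrefixOf (c :: rest)
      · simp only [if_pos hpre]
        have hpre' : sep <+: (c :: rest) := List.isPrefixOf_iff_prefix.mp hpre
        have hfind : PySem.Chars.find (c :: rest) sep = 0 := pv_find_of_prefix _ _ hpre'
        have hdl : (List.drop sep.length (c :: rest)).length ≤ n := by
          simp only [List.length_drop, List.length_cons]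
          simp only [List.length_cons] at hl
          omega
        have hsp : PySem.Chars.splitOn ((c :: rest).drop sep.length) sep =
            (if PySem.Chars.find ((c :: rest).drop sep.length) sep = -1
             then [(c :: rest).drop sep.length]
             else ((c :: rest).drop sep.length).take
                    (PySem.Chars.find ((c :: rest).drop sep.length) sep).toNat ::
                  PySem.Chars.splitOn (((c :: rest).drop sep.length).drop
                    ((PySem.Chars.find ((c :: rest).drop sep.length) sep).toNat + sep.length)) sep) := by
          conv_lhs => rw [PySem.Chars.splitOn]
          rw [ih _ hdl _ [] [] (by omega)]
          simp
        rw [ih _ hdl f [] (cur.reverse :: acc) (by simp only [List.length_drop, List.length_cons] at *; omega)]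
        rw [hfind]
        norm_num
        rw [hsp, List.drop_drop]
      · simp only [if_neg hpre]
        have hpre' : ¬ sep <+: (c :: rest) := fun h => hpre (List.isPrefixOf_iff_prefix.mpr h)
        have hrl : rest.length ≤ n := by simp at hl; omega
        rw [ih rest hrl f (c :: cur) acc (by simp at hf; omega)]
        rw [pv_find_cons c rest sep hpre']
        by_cases hr : PySem.Chars.find rest sep = -1
        · simp only [hr, if_true]
          simp
        · have hnn : 0 ≤ PySem.Chars.find rest sep := by
            have := PySem.Chars.neg_one_le_find rest sep
            omega
          have h1 : PySem.Chars.find rest sep + 1 ≠ -1 := by omega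
          simp only [hr, h1, if_false]
          have ht : (PySem.Chars.find rest sep + 1).toNat = (PySem.Chars.find rest sep).toNat + 1 := by omega
          rw [ht]
          simp [List.take_succ_cons, List.drop_succ_cons, Nat.add_right_comm]

lemma pv_splitOn_rec (l sep : List Char) (hsep : sep ≠ []) :
    PySem.Chars.splitOn l sep =
      if PySem.Chars.find l sep = -1 then [l]
      else l.take (PySem.Chars.find l sep).toNat ::
           PySem.Chars.splitOn (l.drop ((PySem.Chars.find l sep).toNat + sep.length)) sep := by
  conv_lhs => rw [PySem.Chars.splitOn]
  rw [pv_go_spec sep hsep l.length l le_rfl (l.length + 1) [] [] (by omega)]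
  simp

lemma pv_splitOn_ne_nil (l sep : List Char) (hsep : sep ≠ []) : PySem.Chars.splitOn l sep ≠ [] := by
  rw [pv_splitOn_rec l sep hsep]
  split <;> simp

lemma pv_lastLen (sep : List Char) (hsep : sep ≠ []) :
    ∀ n (l : List Char), l.length ≤ n →
      ((PySem.Chars.splitOn l sep).getLastD []).length ≤ l.length := by
  intro n
  induction n with
  | zero =>
    intro l hl
    have : l = [] := List.length_eq_zero_iff.mp (by omega)
    subst this
    rw [pv_splitOn_rec [] sep hsep, pv_find_nil_of_ne sep hsep]
    simp
  | succ n ih =>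
    intro l hl
    rw [pv_splitOn_rec l sep hsep]
    by_cases hf : PySem.Chars.find l sep = -1
    · simp [hf]
    · simp only [hf, if_false]
      have hsl : 1 ≤ sep.length := by
        cases sep
        · exact absurd rfl hsep
        · simp
      have hnn : 0 ≤ PySem.Chars.find l sep := by
        have := PySem.Chars.neg_one_le_find l sep
        omega
      set d := l.drop ((PySem.Chars.find l sep).toNat + sep.length) with hd
      have hdl : d.length ≤ n := by
        rw [hd]
        simp only [List.length_drop]
        -- need l ≠ [] so length ≥ 1
        rcases l with _ | ⟨c, rest⟩
        · simp [pv_find_nil_of_ne sep hsep] at hf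
        · simp only [List.length_cons] at hl ⊢
          omega
      have := ih d hdl
      rw [List.getLastD_cons]
      have hne : PySem.Chars.splitOn d sep ≠ [] := pv_splitOn_ne_nil d sep hsep
      -- getLastD of nonempty list independent of default
      have hdd : (PySem.Chars.splitOn d sep).getLastD (l.take (PySem.Chars.find l sep).toNat)
          = (PySem.Chars.splitOn d sep).getLastD [] := by
        rcases hx : PySem.Chars.splitOn d sep with _ | ⟨a, t⟩
        · exact absurd hx hne
        · obtain ⟨v, hv⟩ := Option.isSome_iff_exists.mp (List.getLast?_isSome.mpr (List.cons_ne_nil a t))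
          simp [hv]
      rw [hdd]
      calc ((PySem.Chars.splitOn d sep).getLastD []).length ≤ d.length := this
        _ ≤ l.length := by rw [hd]; simp

lemma pv_getLastD_of_ne_nil (l : List (List Char)) (h : l ≠ []) (x y : List Char) :
    l.getLastD x = l.getLastD y := by
  cases l with
  | nil => exact absurd rfl h
  | cons a as => rw [List.getLastD_cons, List.getLastD_cons]

lemma pv_loopA_colon : ∀ n (r p : List Char) (fuel : Nat), r.length ≤ n → n + 2 ≤ fuel →
    pvLoopA (p ++ r) [':', ':'] (p.length : Int) fuel =
      pvColonLoop (p ++ (PySem.Chars.splitOn r [':', ':']).headD [])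
          (PySem.Chars.splitOn r [':', ':']).tail ++
        (if (p ++ r).isEmpty then [] else [p ++ r]) := by
  intro n
  induction n using Nat.strong_induction_on with
  | _ n ih =>
  intro r p fuel hr hf
  obtain ⟨f, rfl⟩ : ∃ f, fuel = f + 1 := ⟨fuel - 1, by omega⟩
  have hple : p.length ≤ (p ++ r).length := by simp
  have hfr : PySem.Chars.findFrom (p ++ r) [':', ':'] (p.length : Int) =
      if PySem.Chars.find r [':', ':'] = -1 then -1
      else (p.length : Int) + PySem.Chars.find r [':', ':'] := by
    rw [PySem.Chars.findFrom_natCast (p ++ r) [':', ':'] p.length hple, List.drop_left]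
  by_cases hfind : PySem.Chars.find r [':', ':'] = -1
  · rw [pv_splitOn_rec r [':', ':'] (by simp), hfind]
    simp only [if_pos rfl]
    show pvLoopA (p ++ r) [':', ':'] (p.length : Int) (f + 1) = _
    rw [pvLoopA]
    simp only [hfr, hfind, if_pos rfl]
    norm_num [pvColonLoop]
  · have hnn : 0 ≤ PySem.Chars.find r [':', ':'] := by
      have := PySem.Chars.neg_one_le_find r [':', ':']
      omega
    set j := (PySem.Chars.find r [':', ':']).toNat with hj
    have hjint : PySem.Chars.find r [':', ':'] = (j : Int) := by omega
    obtain ⟨hp, -⟩ := PySem.Chars.find_spec hnn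
    rw [← hj] at hp
    obtain ⟨t, ht⟩ := hp
    have htd : List.drop (j + 2) r = t := by
      rw [← List.drop_drop, ← ht]
      simp
    have hjle : j + 2 ≤ r.length := by
      have : (List.drop j r).length = t.length + 2 := by rw [← ht]; simp
      simp only [List.length_drop] at this
      omega
    have hrsplit : PySem.Chars.splitOn r [':', ':'] =
        r.take j :: PySem.Chars.splitOn t [':', ':'] := by
      rw [pv_splitOn_rec r [':', ':'] (by simp), if_neg hfind, ← hj]
      norm_num [htd]
    obtain ⟨e, t'', hst⟩ : ∃ e t'', PySem.Chars.splitOn t [':', ':'] = e :: t'' := by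
      rcases hx : PySem.Chars.splitOn t [':', ':'] with _ | ⟨e, t''⟩
      · exact absurd hx (pv_splitOn_ne_nil t [':', ':'] (by simp))
      · exact ⟨e, t'', rfl⟩
    show pvLoopA (p ++ r) [':', ':'] (p.length : Int) (f + 1) = _
    rw [pvLoopA]
    simp only [hfr, hfind, if_false]
    simp only [hjint]
    have hc1 : ¬ (((p.length : Int) + (j : Int)) = -1 ∧ ([':', ':'] : List Char) = ['/']) := by
      rintro ⟨-, h2⟩
      simp at h2
    rw [if_neg hc1]
    have hc2 : ((p.length : Int) + (j : Int)) ≠ (-1 : Int) := by omega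
    rw [if_neg hc2]
    have htl : t.length = r.length - (j + 2) := by rw [← htd]; simp
    have hslice : PySem.Chars.slice (p ++ r) none (some ((p.length : Int) + (j : Int))) =
        p ++ r.take j := by
      rw [PySem.Chars.slice_eq_listSlice, PySem.List.slice_to _ (by omega)]
      have h1 : ((p.length : Int) + (j : Int)).toNat = p.length + j := by omega
      rw [h1, List.take_append]
      congr 1
      · exact List.take_of_length_le (by omega)
      · congr 1
        omega
    rw [hslice]
    have hpos : ((p.length : Int) + (j : Int)) + (([':', ':'] : List Char).length : Int) =
        (((p ++ r.take j ++ [':', ':']).length : Nat) : Int) := by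
      simp [List.length_append, List.length_take]
      omega
    rw [hpos]
    have hs : p ++ r = (p ++ r.take j ++ [':', ':']) ++ t := by
      conv_lhs => rw [← List.take_append_drop j r]
      rw [← ht]
      simp
    have hInd := ih t.length (by omega) t (p ++ r.take j ++ [':', ':']) f le_rfl (by omega)
    rw [hst] at hInd
    simp only [List.headD_cons, List.tail_cons] at hInd
    conv_lhs => rw [hs, hInd, ← hs]
    rw [hrsplit, hst]
    simp only [List.headD_cons, List.tail_cons]
    show _ = pvColonLoop (p ++ r.take j) (e :: t'') ++ _
    rw [pvColonLoop]
    have hacc : (p ++ r.take j ++ [':', ':']) ++ e = (p ++ r.take j) ++ ':' :: ':' :: e := by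
      simp
    rw [hacc]
    have hlen0 : (p ++ r.take j).length = p.length + j := by
      simp [List.length_take]
      omega
    have hlen : (p ++ r.take j).isEmpty = true ↔ p.length + j = 0 := by
      rw [List.isEmpty_iff, ← List.length_eq_zero_iff, hlen0]
    have hprne : p ++ r ≠ [] := by
      intro hcon
      rcases List.append_eq_nil_iff.mp hcon with ⟨-, hrnil⟩
      rw [hrnil] at hjle
      simp at hjle
    have hpr : (p ++ r).isEmpty = false := by
      simp [hprne]
    by_cases hz : p.length + j = 0
    · have hg1 : ((p.length : Int) + (j : Int)) = 0 := by omega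
      have h2 : (p ++ r.take j).isEmpty = true := hlen.mpr hz
      simp [hg1, h2, hpr]
    · have hg1 : ((p.length : Int) + (j : Int)) ≠ 0 := by omega
      have h2 : ¬ (p ++ r.take j).isEmpty = true := fun hcon => hz (hlen.mp hcon)
      simp [hg1, h2, hpr]

lemma pv_loopA_slash : ∀ n (r p : List Char) (q? : Option (List Char)) (fuel : Nat),
    r.length ≤ n → n + 3 ≤ fuel →
    ((q? = none ∧ p = []) ∨ (∃ q, q? = some q ∧ p = q ++ ['/'])) →
    pvLoopA (p ++ r) ['/'] (p.length : Int) fuel =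
      pvSlashLoop (PySem.Chars.splitOn r ['/']).dropLast q? ++
      pvColonLoop
        ((p ++ r.take (r.length - ((PySem.Chars.splitOn r ['/']).getLastD []).length)) ++
          (PySem.Chars.splitOn ((PySem.Chars.splitOn r ['/']).getLastD []) [':', ':']).headD [])
        (PySem.Chars.splitOn ((PySem.Chars.splitOn r ['/']).getLastD []) [':', ':']).tail ++
      (if (p ++ r).isEmpty then [] else [p ++ r]) := by
  intro n
  induction n using Nat.strong_induction_on with
  | _ n ih =>
  intro r p q? fuel hr hf hinv
  obtain ⟨f, rfl⟩ : ∃ f, fuel = f + 1 := ⟨fuel - 1, by omega⟩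
  have hple : p.length ≤ (p ++ r).length := by simp
  have hfr : PySem.Chars.findFrom (p ++ r) ['/'] (p.length : Int) =
      if PySem.Chars.find r ['/'] = -1 then -1
      else (p.length : Int) + PySem.Chars.find r ['/'] := by
    rw [PySem.Chars.findFrom_natCast (p ++ r) ['/'] p.length hple, List.drop_left]
  by_cases hfind : PySem.Chars.find r ['/'] = -1
  · have hrsplit : PySem.Chars.splitOn r ['/'] = [r] := by
      rw [pv_splitOn_rec r ['/'] (by simp), hfind]
      simp
    rw [hrsplit]
    simp only [List.dropLast_singleton, List.getLastD_cons]
    show pvLoopA (p ++ r) ['/'] (p.length : Int) (f + 1) = _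
    rw [pvLoopA]
    simp only [hfr, hfind, if_pos rfl]
    norm_num [pvSlashLoop]
    rw [pv_loopA_colon n r p f hr (by omega)]
    norm_num [List.getLastD]
  · have hnn : 0 ≤ PySem.Chars.find r ['/'] := by
      have := PySem.Chars.neg_one_le_find r ['/']
      omega
    set j := (PySem.Chars.find r ['/']).toNat with hj
    have hjint : PySem.Chars.find r ['/'] = (j : Int) := by omega
    obtain ⟨hp, -⟩ := PySem.Chars.find_spec hnn
    rw [← hj] at hp
    obtain ⟨t, ht⟩ := hp
    have htd : List.drop (j + 1) r = t := by
      rw [← List.drop_drop, ← ht]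
      simp
    have hjle : j + 1 ≤ r.length := by
      have : (List.drop j r).length = t.length + 1 := by rw [← ht]; simp
      simp only [List.length_drop] at this
      omega
    have hrsplit : PySem.Chars.splitOn r ['/'] =
        r.take j :: PySem.Chars.splitOn t ['/'] := by
      rw [pv_splitOn_rec r ['/'] (by simp), if_neg hfind, ← hj]
      norm_num [htd]
    have hstne : PySem.Chars.splitOn t ['/'] ≠ [] := pv_splitOn_ne_nil t ['/'] (by simp)
    have hLle : ((PySem.Chars.splitOn t ['/']).getLastD []).length ≤ t.length :=
      pv_lastLen ['/'] (by simp) t.length t le_rfl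
    have hrlen : r.length = j + 1 + t.length := by
      have : (List.drop j r).length = t.length + 1 := by rw [← ht]; simp
      simp only [List.length_drop] at this
      omega
    have hrdecomp : r = r.take j ++ '/' :: t := by
      conv_lhs => rw [← List.take_append_drop j r]
      rw [← ht]
      simp
    have htakejlen : (r.take j).length = j := by
      simp [List.length_take]
      omega
    have hbase : r.take (r.length - ((PySem.Chars.splitOn t ['/']).getLastD []).length) =
        r.take j ++ '/' :: t.take (t.length - ((PySem.Chars.splitOn t ['/']).getLastD []).length) := by
      have h1 : r.length - ((PySem.Chars.splitOn t ['/']).getLastD []).length =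
          j + ((t.length - ((PySem.Chars.splitOn t ['/']).getLastD []).length) + 1) := by omega
      rw [h1, List.take_add, ← ht]
      simp [List.take_succ_cons]
    -- LHS unfold
    show pvLoopA (p ++ r) ['/'] (p.length : Int) (f + 1) = _
    rw [pvLoopA]
    simp only [hfr, hfind, if_false]
    simp only [hjint]
    have hc1 : ¬ (((p.length : Int) + (j : Int)) = -1 ∧ True) := by
      rintro ⟨h1, -⟩
      omega
    rw [if_neg hc1]
    have hc2 : ((p.length : Int) + (j : Int)) ≠ (-1 : Int) := by omega
    rw [if_neg hc2]
    have hslice : PySem.Chars.slice (p ++ r) none (some ((p.length : Int) + (j : Int))) =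
        p ++ r.take j := by
      rw [PySem.Chars.slice_eq_listSlice, PySem.List.slice_to _ (by omega)]
      have h1 : ((p.length : Int) + (j : Int)).toNat = p.length + j := by omega
      rw [h1, List.take_append]
      congr 1
      · exact List.take_of_length_le (by omega)
      · congr 1
        omega
    rw [hslice]
    have hpos : ((p.length : Int) + (j : Int)) + ((['/'] : List Char).length : Int) =
        (((p ++ r.take j ++ ['/']).length : Nat) : Int) := by
      simp [List.length_append, htakejlen]
      omega
    rw [hpos]
    have hs : p ++ r = (p ++ r.take j ++ ['/']) ++ t := by
      conv_lhs => rw [hrdecomp]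
      simp
    have hInd := ih t.length (by omega) t (p ++ r.take j ++ ['/']) (some (p ++ r.take j)) f
      le_rfl (by omega) (Or.inr ⟨p ++ r.take j, rfl, by simp⟩)
    conv_lhs => rw [hs, hInd, ← hs]
    -- RHS reshape
    rw [hrsplit, List.dropLast_cons_of_ne_nil hstne, List.getLastD_cons,
        pv_getLastD_of_ne_nil _ hstne (r.take j) [], hbase]
    rcases hinv with ⟨hq, hpnil⟩ | ⟨q, hq, hpq⟩ <;> subst hq
    · subst hpnil
      rw [pvSlashLoop]
      have hprne : (([] : List Char) ++ r) ≠ [] := by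
        intro hcon
        simp at hcon
        rw [hcon] at hjle
        simp at hjle
      by_cases hz : j = 0
      · have hg1 : (((([] : List Char)).length : Int) + (j : Int)) = 0 := by simp [hz]
        have hemp : (r.take j).isEmpty = true := by simp [hz]
        simp [hemp, hz]
      · have hg1 : (((([] : List Char)).length : Int) + (j : Int)) ≠ 0 := by
          simp
          omega
        have hemp : ¬ (r.take j).isEmpty = true := by
          rw [List.isEmpty_iff, ← List.length_eq_zero_iff, htakejlen]
          omega
        simp [hemp, hz]
    · subst hpq
      rw [pvSlashLoop]
      have hprne : ((q ++ ['/']) ++ r) ≠ [] := by simp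
      have hg1 : ((((q ++ ['/'])).length : Int) + (j : Int)) ≠ 0 := by
        simp
        omega
      have hemp : ¬ (q ++ '/' :: r.take j).isEmpty = true := by simp
      have hg2 : ¬ ((q.length : Int) + 1 + (j : Int) = 0) := by omega
      simp [hg2, hemp]

-- ===== VERDICT (by name: the statement is the Claim_ definition above) =====
theorem parent_nodeids_iter_spec : Claim_equal_parent_nodeids_iter := by
  intro nodeid _
  unfold Spec_parent_nodeids_iter parent_nodeids_iter parent_nodeids_iter_alt
  have hL : ((PySem.Chars.splitOn nodeid.toList ['/']).getLastD []).length ≤ nodeid.toList.length :=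
    pv_lastLen ['/'] (by simp) nodeid.toList.length nodeid.toList le_rfl
  have hbase : PySem.Chars.slice nodeid.toList none
      (some ((nodeid.toList.length : Int) - ((((PySem.Chars.splitOn nodeid.toList ['/']).getLastD []).length : Nat) : Int))) =
      nodeid.toList.take (nodeid.toList.length - ((PySem.Chars.splitOn nodeid.toList ['/']).getLastD []).length) := by
    rw [PySem.Chars.slice_eq_listSlice, PySem.List.slice_to _ (by omega)]
    congr 1
    omega
  have hmain := pv_loopA_slash nodeid.toList.length nodeid.toList [] none
    (nodeid.toList.length + 3) le_rfl le_rfl (Or.inl ⟨rfl, rfl⟩)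
  simp only [List.nil_append, List.length_nil, Nat.cast_zero] at hmain
  simp only [hmain, hbase]
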